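-- pv_equiv track=rewrite | github.com/poojithayadavalli/Searching | count subarray with sum greaterthan remainingelementsum.py | Count
-- ===== SOURCE A (Python) =====
-- def Count(arr, n) :
--
--     total_sum = 0
--     count = 0
--     for i in range(n) :
--         total_sum += arr[i]
--     for i in range(n-1) :
--         subarray_sum = 0
--         for j in range(i, n) :
--             subarray_sum += arr[j]
--             remaining_sum = total_sum - subarray_sum
--             if (subarray_sum > remaining_sum) :
--                 count += 1
--
--     return count
-- ===== SOURCE B (Python) =====
-- # Prefix sums + a sorted list maintained by binary-search insertion:
-- # counting pairs (a, b) with 2*P[a] < 2*P[b] - total replaces A's O(n^2)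
-- # re-summation of every subarray.
--
-- def _bisect_left(s, x):
--     lo = 0
--     hi = len(s)
--     while lo < hi:
--         mid = (lo + hi) // 2
--         if s[mid] < x:
--             lo = mid + 1
--         else:
--             hi = mid
--     return lo
--
-- def Count(arr, n):
--     prefix = [0]
--     for i in range(n):
--         prefix.append(prefix[-1] + arr[i])
--     total = prefix[-1]
--     count = 0
--     starts = []  # sorted list of 2*prefix[a] for start indices a seen so far (a <= n-2)
--     for b in range(1, n + 1):
--         if b <= n - 1:
--             v = 2 * prefix[b - 1]
--             starts.insert(_bisect_left(starts, v), v)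
--         count += _bisect_left(starts, 2 * prefix[b] - total)
--     return count
-- ===== Notes on version B (the rewrite author's own statement) =====
-- stated objective: faster
-- what changed: A re-sums every subarray in O(n^2) nested loops; B builds prefix sums once and counts, for each right endpoint b, the earlier prefix values 2*P[a] below 2*P[b]-total via binary search in a sorted list maintained by bisect insertion.
import Mathlib
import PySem

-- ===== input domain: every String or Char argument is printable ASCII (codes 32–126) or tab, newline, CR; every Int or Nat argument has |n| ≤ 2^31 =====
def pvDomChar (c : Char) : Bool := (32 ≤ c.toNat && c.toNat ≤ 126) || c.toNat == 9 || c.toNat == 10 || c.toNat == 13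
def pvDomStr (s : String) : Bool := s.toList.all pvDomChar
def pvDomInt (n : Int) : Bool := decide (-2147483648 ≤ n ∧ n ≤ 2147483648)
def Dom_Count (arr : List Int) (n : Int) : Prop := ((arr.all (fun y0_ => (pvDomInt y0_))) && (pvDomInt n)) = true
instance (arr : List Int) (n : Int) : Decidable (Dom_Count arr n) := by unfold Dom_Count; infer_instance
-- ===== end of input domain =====

-- B replaces A's O(n^2) re-summation of every subarray by pref sums plus a
-- sorted list of 2*pref[a], queried by binary search for each right endpoint.

-- ===== PORT A =====
def Count (arr : List Int) (n : Int) : Int :=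
  let total_sum : Int :=
    (PySem.List.pyRange 0 n 1).foldl (fun t i => t + PySem.List.pyGetD arr i 0) 0
  ((PySem.List.pyRange 0 (n - 1) 1).foldl (fun (count : Int) i =>
      ((PySem.List.pyRange i n 1).foldl (fun (s : Int × Int) j =>
          let sub := s.1 + PySem.List.pyGetD arr j 0
          (sub, if total_sum - sub < sub then s.2 + 1 else s.2)) ((0 : Int), count)).2)
    0)

-- ===== PORT B =====
-- hand-written binary search from Source B (_bisect_left), transliterated step for step
def pvBisect (s : List Int) (x : Int) (lo hi : Int) : Int :=
  if h : lo < hi then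
    let mid := PySem.Int.floordiv (lo + hi) 2
    if PySem.List.pyGetD s mid 0 < x then pvBisect s x (mid + 1) hi
    else pvBisect s x lo mid
  else lo
termination_by (hi - lo).toNat
decreasing_by
  · have := PySem.Int.floordiv_eq_ediv_of_pos (a := lo + hi) (b := 2) (by omega)
    simp only [mid, this] at *; omega
  · have := PySem.Int.floordiv_eq_ediv_of_pos (a := lo + hi) (b := 2) (by omega)
    simp only [mid, this] at *; omega

def Count_alt (arr : List Int) (n : Int) : Int :=
  let pref :=
    (PySem.List.pyRange 0 n 1).foldl
      (fun p i => p ++ [PySem.List.pyGetD p (-1) 0 + PySem.List.pyGetD arr i 0]) [(0 : Int)]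
  let total := PySem.List.pyGetD pref (-1) 0
  (((PySem.List.pyRange 1 (n + 1) 1).foldl (fun (s : List Int × Int) b =>
      let starts :=
        if b ≤ n - 1 then
          let v := 2 * PySem.List.pyGetD pref (b - 1) 0
          PySem.List.insert s.1 (pvBisect s.1 v 0 (PySem.List.len s.1)) v
        else s.1
      (starts,
        s.2 + pvBisect starts (2 * PySem.List.pyGetD pref b 0 - total) 0
                (PySem.List.len starts)))
    ([], 0)).2)

-- ===== PRECONDITION & SPEC =====
-- Pre_ excludes exactly the inputs where Python A raises IndexError: n > len(arr)
def Pre_Count (arr : List Int) (n : Int) : Prop := n ≤ (arr.length : Int)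
instance (arr : List Int) (n : Int) : Decidable (Pre_Count arr n) := by
  unfold Pre_Count; infer_instance
def pvWitness_Count : List Int × Int := ([3, -1, 2, -2, 5], 5)

def Spec_Count (arr : List Int) (n : Int) (out : Int) : Prop := out = Count_alt arr n
instance (arr : List Int) (n : Int) (out : Int) : Decidable (Spec_Count arr n out) := by
  unfold Spec_Count; infer_instance

-- ===== CLAIM (what is proved, stated in full; the proofs are below) =====
def Claim_equal_Count : Prop :=
  ∀ (arr : List Int) (n : Int), Dom_Count arr n → Pre_Count arr n →
    Spec_Count arr n (Count arr n)

-- ===== LEMMAS AND PROOFS =====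

lemma pvCountP_range_eq (p : Nat → Bool) (m : Nat) :
    ((List.range m).countP p) = ∑ k ∈ Finset.range m, (if p k then 1 else 0) := by
  induction m with
  | zero => simp
  | succ m ih =>
    rw [List.range_succ, List.countP_append, Finset.sum_range_succ, ih]
    simp [List.countP_cons]

lemma pvSum_map_range (g : Nat → Nat) (m : Nat) :
    ((List.range m).map g).sum = ∑ k ∈ Finset.range m, g k := by
  induction m with
  | zero => simp
  | succ m ih => simp [List.range_succ, Finset.sum_range_succ, ih]

lemma pvSorted_getD_le (s : List Int) (hs : s.Pairwise (· ≤ ·)) (i j : Nat)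
    (hij : i ≤ j) (hj : j < s.length) : s.getD i 0 ≤ s.getD j 0 := by
  rcases eq_or_lt_of_le hij with rfl | hlt
  · exact le_refl _
  · rw [List.getD_eq_getElem s 0 (lt_trans hlt hj), List.getD_eq_getElem s 0 hj]
    exact List.pairwise_iff_getElem.mp hs i j (lt_trans hlt hj) hj hlt

lemma pvSorted_lt_iff (s : List Int) (x : Int) (hs : s.Pairwise (· ≤ ·)) :
    ∀ i, i < s.length → (s.getD i 0 < x ↔ i < s.countP (fun y => decide (y < x))) := by
  induction s with
  | nil => simp
  | cons a t ih =>
    rcases List.pairwise_cons.mp hs with ⟨ha, ht⟩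
    intro i hi
    by_cases hax : a < x
    · rw [List.countP_cons]
      cases i with
      | zero => simp [hax]
      | succ i =>
        simp only [List.getD_cons_succ]
        rw [ih ht i (by simpa using hi)]
        simp [hax]
    · have hz : t.countP (fun y => decide (y < x)) = 0 := by
        rw [List.countP_eq_zero]
        intro y hy
        simp only [decide_eq_true_eq]
        exact not_lt.mpr (le_trans (not_lt.mp hax) (ha y hy))
      rw [List.countP_cons, hz]
      simp only [hax, decide_eq_true_eq]
      cases i with
      | zero => simp [hax]
      | succ i =>
        have hit : i < t.length := by simpa using hi
        simp only [List.getD_cons_succ]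
        rw [List.getD_eq_getElem t 0 hit]
        have : a ≤ t[i] := ha _ (List.getElem_mem hit)
        constructor
        · intro h; exact absurd (lt_of_le_of_lt (le_trans (not_lt.mp hax) this) h) (lt_irrefl x)
        · intro h; simp at h

lemma pvBisect_go (s : List Int) (x : Int) (hs : s.Pairwise (· ≤ ·)) :
    ∀ (d lo hi : Nat), hi - lo = d → lo ≤ hi → hi ≤ s.length →
      (∀ i, i < lo → s.getD i 0 < x) →
      (∀ i, hi ≤ i → i < s.length → ¬ s.getD i 0 < x) →
      pvBisect s x (↑lo) (↑hi) = ↑(s.countP (fun y => decide (y < x))) := by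
  intro d
  induction d using Nat.strong_induction_on with
  | _ d ih =>
    intro lo hi hd hlohi hhi hl hr
    rw [pvBisect]
    by_cases hlh : lo < hi
    · rw [dif_pos (by exact_mod_cast hlh)]
      have hmid : PySem.Int.floordiv ((lo : Int) + (hi : Int)) 2 = ((lo + hi) / 2 : Nat) := by
        rw [show ((lo : Int) + (hi : Int)) = ((lo + hi : Nat) : Int) by push_cast; ring]
        exact_mod_cast PySem.Int.floordiv_natCast (lo + hi) 2
      set midn : Nat := (lo + hi) / 2 with hmidn
      have h1 : lo ≤ midn := by omega
      have h2 : midn < hi := by omega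
      have hget : PySem.List.pyGetD s ((midn : Nat) : Int) 0 = s.getD midn 0 :=
        PySem.List.pyGetD_natCast s midn 0
      rw [hmid]
      by_cases hbr : s.getD midn 0 < x
      · rw [if_pos (by rw [hget]; exact hbr)]
        rw [show ((midn : Int) + 1) = ((midn + 1 : Nat) : Int) by push_cast; ring]
        exact ih (hi - (midn + 1)) (by omega) (midn + 1) hi rfl (by omega) hhi
          (fun i hi' => lt_of_le_of_lt
            (pvSorted_getD_le s hs i midn (by omega) (by omega)) hbr)
          hr
      · rw [if_neg (by rw [hget]; exact hbr)]
        exact ih (midn - lo) (by omega) lo midn rfl h1 (by omega) hl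
          (fun i hmi hil => fun hcon =>
            hbr (lt_of_le_of_lt (pvSorted_getD_le s hs midn i hmi hil) hcon))
    · rw [dif_neg (by exact_mod_cast hlh)]
      have hlo : lo = hi := by omega
      subst hlo
      have hk := List.countP_le_length (l := s) (p := fun y => decide (y < x))
      rcases lt_trichotomy lo (s.countP (fun y => decide (y < x))) with h | h | h
      · exact absurd ((pvSorted_lt_iff s x hs lo (by omega)).mpr h) (hr lo le_rfl (by omega))
      · exact_mod_cast h
      · exact absurd ((pvSorted_lt_iff s x hs _ (by omega)).mp (hl _ h)) (by omega)

lemma pvBisect_eq_countP (s : List Int) (x : Int) (hs : s.Pairwise (· ≤ ·)) :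
    pvBisect s x 0 (PySem.List.len s) = ↑(s.countP (fun y => decide (y < x))) := by
  rw [PySem.List.len_eq]
  exact pvBisect_go s x hs s.length 0 s.length rfl (Nat.zero_le _) le_rfl
    (fun i hi => absurd hi (Nat.not_lt_zero i))
    (fun i h1 h2 => absurd (lt_of_le_of_lt h1 h2) (lt_irrefl _))

lemma pvInsert_sorted (s : List Int) (v : Int) (hs : s.Pairwise (· ≤ ·)) :
    (s.take (s.countP (fun y => decide (y < v))) ++ v :: s.drop (s.countP (fun y => decide (y < v)))).Pairwise (· ≤ ·) := by
  set j := s.countP (fun y => decide (y < v)) with hj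
  have hjlen : j ≤ s.length := List.countP_le_length
  have htake : ∀ y ∈ s.take j, y < v := by
    intro y hy
    rcases List.mem_take_iff_getElem.mp hy with ⟨i, hi, rfl⟩
    have hi' : i < s.length := lt_of_lt_of_le hi (min_le_right _ _)
    have := (pvSorted_lt_iff s v hs i hi').mpr (by rw [← hj]; exact lt_of_lt_of_le hi (min_le_left _ _))
    rwa [List.getD_eq_getElem s 0 hi'] at this
  have hdrop : ∀ y ∈ s.drop j, v ≤ y := by
    intro y hy
    rw [List.mem_iff_getElem] at hy
    rcases hy with ⟨i, hi, rfl⟩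
    have hi' : j + i < s.length := by simp at hi; omega
    rw [List.getElem_drop]
    have := (pvSorted_lt_iff s v hs (j + i) hi')
    rw [List.getD_eq_getElem s 0 hi'] at this
    by_contra hc
    have hcon := this.mp (lt_of_not_ge hc)
    omega
  refine List.pairwise_append.mpr ⟨hs.sublist (List.take_sublist j s), ?_, ?_⟩
  · refine List.pairwise_cons.mpr ⟨hdrop, hs.sublist (List.drop_sublist j s)⟩
  · intro a ha b hb
    rcases List.mem_cons.mp hb with rfl | hb'
    · exact le_of_lt (htake a ha)
    · exact le_trans (le_of_lt (htake a ha)) (hdrop b hb')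

def pvP (arr : List Int) (k : Nat) : Int := (arr.take k).sum

lemma pvSumTake (arr : List Int) (k : Nat) (hk : k < arr.length) :
    pvP arr (k+1) = pvP arr k + arr.getD k 0 := by
  unfold pvP
  rw [List.sum_take_succ arr k hk, List.getD_eq_getElem arr 0 hk]

lemma pvFoldSum (arr : List Int) :
    ∀ (k : Nat), k ≤ arr.length → ∀ c : Int,
      (List.range k).foldl (fun (t : Int) (i : Nat) => t + PySem.List.pyGetD arr (i : Int) 0) c = c + pvP arr k := by
  intro k
  induction k with
  | zero => intro _ c; simp [pvP]
  | succ k ih =>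
    intro hk c
    rw [List.range_succ, List.foldl_append, ih (by omega) c]
    simp only [List.foldl_cons, List.foldl_nil]
    rw [PySem.List.pyGetD_natCast arr k 0, pvSumTake arr k (by omega)]
    ring

lemma pvTotal_eq (arr : List Int) (N : Nat) (hlen : N ≤ arr.length) :
    (PySem.List.pyRange 0 (↑N) 1).foldl (fun t i => t + PySem.List.pyGetD arr i 0) 0
      = pvP arr N := by
  rw [PySem.List.pyRange_one]
  simp only [sub_zero, Int.toNat_natCast, List.foldl_map, zero_add]
  rw [pvFoldSum arr N hlen 0]
  ring

lemma pvInnerA (arr : List Int) (T : Int) (a : Nat) (c : Int) :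
    ∀ (d : Nat), a + d ≤ arr.length →
    (PySem.List.pyRange (↑a) (↑(a + d)) 1).foldl
        (fun (s : Int × Int) j =>
          let sub := s.1 + PySem.List.pyGetD arr j 0
          (sub, if T - sub < sub then s.2 + 1 else s.2)) ((0 : Int), c)
      = (pvP arr (a + d) - pvP arr a,
         c + ↑((List.range' (a + 1) d).countP (fun b => decide (T < 2 * pvP arr b - 2 * pvP arr a)))) := by
  intro d
  induction d with
  | zero =>
    intro _
    rw [PySem.List.pyRange_one_eq_nil (by simp)]
    simp
  | succ d ih =>
    intro hlen
    have hcast : ((a + (d + 1) : Nat) : Int) = ((a + d : Nat) : Int) + 1 := by push_cast; ring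
    rw [hcast, PySem.List.pyRange_one_succ_right (by exact_mod_cast Nat.le_add_right a d),
        List.foldl_append, ih (by omega)]
    simp only [List.foldl_cons, List.foldl_nil]
    rw [show ((a + d : Nat) : Int) = (((a + d : Nat) : Nat) : Int) from rfl,
        PySem.List.pyGetD_natCast arr (a + d) 0]
    have hsub : pvP arr (a + d) - pvP arr a + arr.getD (a + d) 0
        = pvP arr (a + d + 1) - pvP arr a := by
      rw [pvSumTake arr (a + d) (by omega)]; ring
    have hrange : List.range' (a + 1) (d + 1) = List.range' (a + 1) d ++ [a + 1 + d] :=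
      List.range'_1_concat
    rw [hsub, hrange, List.countP_append, show a + 1 + d = a + d + 1 by omega]
    simp only [List.countP_cons, List.countP_nil, Prod.mk.injEq]
    constructor
    · show pvP arr (a + d + 1) - pvP arr a = pvP arr (a + (d + 1)) - pvP arr a
      rfl
    · by_cases hcd : T < 2 * pvP arr (a + d + 1) - 2 * pvP arr a
      · rw [if_pos (by omega)]
        simp [hcd]
        ring
      · rw [if_neg (by omega)]
        simp [hcd]

def pvQ (arr : List Int) (N a b : Nat) : Bool :=
  decide (pvP arr N < 2 * pvP arr b - 2 * pvP arr a)

def pvAsum (arr : List Int) (N : Nat) : Nat :=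
  ((List.range (N - 1)).map (fun a => ((List.range' (a + 1) (N - a)).countP (pvQ arr N a)))).sum

lemma pvOuterA (arr : List Int) (N : Nat) (hNlen : N ≤ arr.length) :
    ∀ (l : List Nat) (c : Int), (∀ a ∈ l, a ≤ N) →
      List.foldl (fun x (y : Nat) =>
          (List.foldl (fun (s : Int × Int) j =>
              let sub := s.1 + PySem.List.pyGetD arr j 0
              (sub, if pvP arr N - sub < sub then s.2 + 1 else s.2))
            ((0 : Int), x) (PySem.List.pyRange (0 + (y : Int)) (↑N) 1)).2) c l
        = c + ↑((l.map (fun a => ((List.range' (a + 1) (N - a)).countP (pvQ arr N a)))).sum) := by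
  intro l
  induction l with
  | nil => intro c _; simp
  | cons a t ih =>
    intro c hmem
    have haN : a ≤ N := hmem a (List.mem_cons_self)
    have hsum : a + (N - a) = N := by omega
    rw [List.foldl_cons]
    rw [show (0 : Int) + (a : Int) = ((a : Nat) : Int) by ring]
    rw [show ((N : Nat) : Int) = ((a + (N - a) : Nat) : Int) from congrArg Nat.cast hsum.symm]
    rw [pvInnerA arr (pvP arr N) a c (N - a) (by omega)]
    rw [hsum]
    rw [ih _ (fun b hb => hmem b (List.mem_cons_of_mem a hb))]
    have hcp : (fun b => decide (pvP arr N < 2 * pvP arr b - 2 * pvP arr a)) = pvQ arr N a := rfl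
    rw [hcp]
    simp only [List.map_cons, List.sum_cons]
    push_cast
    ring

lemma pvA_eq (arr : List Int) (n : Int) (h0 : 0 ≤ n) (hlen : n ≤ (arr.length : Int)) :
    Count arr n = ↑(pvAsum arr n.toNat) := by
  set N : Nat := n.toNat with hN
  have hn : ((N : Nat) : Int) = n := by omega
  have hNlen : N ≤ arr.length := by omega
  unfold Count
  rw [← hn, pvTotal_eq arr N hNlen]
  rw [PySem.List.pyRange_one 0 ((N : Int) - 1)]
  have ht : ((N : Int) - 1 - 0).toNat = N - 1 := by omega
  rw [ht, List.foldl_map]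
  rw [pvOuterA arr N hNlen (List.range (N - 1)) 0
      (fun a ha => by have := List.mem_range.mp ha; omega)]
  unfold pvAsum
  ring

lemma pvGetD_neg_one (l : List Int) (k : Nat) (h : l.length = k + 1) (d : Int) :
    PySem.List.pyGetD l (-1) d = l.getD k d := by
  simp [PySem.List.pyGetD, PySem.List.pyGet?, PySem.List.pyIdx?]
  rw [h]; simp

lemma pvPref_eq (arr : List Int) :
    ∀ (N : Nat), N ≤ arr.length →
    (PySem.List.pyRange 0 (↑N) 1).foldl
        (fun p i => p ++ [PySem.List.pyGetD p (-1) 0 + PySem.List.pyGetD arr i 0]) [(0 : Int)]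
      = (List.range (N + 1)).map (pvP arr) := by
  intro N
  induction N with
  | zero =>
    intro _
    rw [PySem.List.pyRange_one_eq_nil (by simp)]
    simp [pvP]
  | succ k ih =>
    intro hlen
    rw [show ((k + 1 : Nat) : Int) = ((k : Nat) : Int) + 1 by push_cast; ring]
    rw [PySem.List.pyRange_one_succ_right (by positivity), List.foldl_append, ih (by omega)]
    simp only [List.foldl_cons, List.foldl_nil]
    have hlength : ((List.range (k + 1)).map (pvP arr)).length = k + 1 := by simp
    rw [pvGetD_neg_one _ k hlength 0]
    rw [PySem.List.getD_map_range (pvP arr) (k + 1) k 0 (by omega)]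
    rw [PySem.List.pyGetD_natCast arr k 0]
    rw [← pvSumTake arr k (by omega)]
    rw [show List.range (k + 1 + 1) = List.range (k + 1) ++ [k + 1] from List.range_succ]
    rw [List.map_append]
    rfl

lemma pvInsert_perm (s : List Int) (v : Int) (j : Nat) :
    (s.take j ++ v :: s.drop j).Perm (v :: s) := by
  refine (List.perm_middle).trans ?_
  rw [List.take_append_drop]

def pvBsumPartial (arr : List Int) (N m : Nat) : Nat :=
  ((List.range' 1 m).map (fun b => ((List.range (min b (N - 1))).countP (fun a => pvQ arr N a b)))).sum

lemma pvBsumPartial_succ (arr : List Int) (N m : Nat) :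
    pvBsumPartial arr N (m + 1)
      = pvBsumPartial arr N m + (List.range (min (m + 1) (N - 1))).countP (fun a => pvQ arr N a (m + 1)) := by
  unfold pvBsumPartial
  rw [List.range'_1_concat, List.map_append, List.sum_append, show 1 + m = m + 1 by omega]
  simp

lemma pvCountS (arr : List Int) (N k b : Nat) (S : List Int) (hs : S.Pairwise (· ≤ ·))
    (hp : S.Perm ((List.range k).map (fun a => 2 * pvP arr a))) :
    pvBisect S (2 * pvP arr b - pvP arr N) 0 (PySem.List.len S)
      = ↑((List.range k).countP (fun a => pvQ arr N a b)) := by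
  rw [pvBisect_eq_countP S _ hs]
  congr 1
  rw [hp.countP_congr (fun x _ => rfl), List.countP_map]
  refine List.countP_congr (fun a _ => ?_)
  simp only [Function.comp_apply, pvQ, decide_eq_true_eq]
  omega

lemma pvBloop (arr : List Int) (N : Nat) :
    ∀ (m : Nat), m ≤ N →
    ∃ S : List Int,
      ((PySem.List.pyRange 1 ((↑m : Int) + 1) 1).foldl
          (fun (s : List Int × Int) b =>
            let starts :=
              if b ≤ (↑N : Int) - 1 then
                let v := 2 * PySem.List.pyGetD ((List.range (N + 1)).map (pvP arr)) (b - 1) 0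
                PySem.List.insert s.1 (pvBisect s.1 v 0 (PySem.List.len s.1)) v
              else s.1
            (starts,
              s.2 + pvBisect starts
                      (2 * PySem.List.pyGetD ((List.range (N + 1)).map (pvP arr)) b 0 - pvP arr N) 0
                      (PySem.List.len starts)))
          ([], 0))
        = (S, (↑(pvBsumPartial arr N m) : Int))
      ∧ S.Pairwise (· ≤ ·)
      ∧ S.Perm ((List.range (min m (N - 1))).map (fun a => 2 * pvP arr a)) := by
  intro m
  induction m with
  | zero =>
    intro _
    refine ⟨[], ?_, List.Pairwise.nil, by simp⟩
    rw [PySem.List.pyRange_one_eq_nil (by norm_num)]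
    simp [pvBsumPartial]
  | succ m ih =>
    intro hm
    rcases ih (by omega) with ⟨S, hfold, hsorted, hperm⟩
    have hminm : min m (N - 1) = m := by omega
    rw [hminm] at hperm
    rw [show ((m + 1 : Nat) : Int) + 1 = ((↑m : Int) + 1) + 1 by push_cast; ring]
    rw [PySem.List.pyRange_one_succ_right (by omega), List.foldl_append, hfold]
    simp only [List.foldl_cons, List.foldl_nil]
    have hb1 : ((↑m : Int) + 1) - 1 = ((m : Nat) : Int) := by ring
    have hgetm : PySem.List.pyGetD ((List.range (N + 1)).map (pvP arr)) ((m : Nat) : Int) 0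
        = pvP arr m := by
      rw [PySem.List.pyGetD_natCast]
      exact PySem.List.getD_map_range (pvP arr) (N + 1) m 0 (by omega)
    have hgetm1 : PySem.List.pyGetD ((List.range (N + 1)).map (pvP arr)) ((↑m : Int) + 1) 0
        = pvP arr (m + 1) := by
      rw [show ((↑m : Int) + 1) = ((m + 1 : Nat) : Int) by push_cast; ring, PySem.List.pyGetD_natCast]
      exact PySem.List.getD_map_range (pvP arr) (N + 1) (m + 1) 0 (by omega)
    by_cases hcase : (↑m : Int) + 1 ≤ (↑N : Int) - 1
    · -- insert branch: m + 1 ≤ N - 1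
      have hmin1 : min (m + 1) (N - 1) = m + 1 := by omega
      rw [if_pos hcase]
      simp only [hb1, hgetm, hgetm1]
      set v : Int := 2 * pvP arr m with hv
      rw [pvBisect_eq_countP S v hsorted]
      have hcnt_le : S.countP (fun y => decide (y < v)) ≤ S.length := List.countP_le_length
      rw [PySem.List.insert_natCast S _ v hcnt_le]
      set S' : List Int := S.take (S.countP (fun y => decide (y < v))) ++ v :: S.drop (S.countP (fun y => decide (y < v))) with hS'
      have hsorted' : S'.Pairwise (· ≤ ·) := pvInsert_sorted S v hsorted
      have hperm' : S'.Perm ((List.range (m + 1)).map (fun a => 2 * pvP arr a)) := by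
        refine (pvInsert_perm S v _).trans ?_
        rw [List.range_succ, List.map_append]
        refine ((hperm.cons v).trans ?_)
        have := (List.perm_middle (a := v) (l₁ := (List.range m).map (fun a => 2 * pvP arr a)) (l₂ := [])).symm
        simpa using this
      refine ⟨S', ?_, hsorted', by rw [hmin1]; exact hperm'⟩
      rw [pvCountS arr N (m + 1) (m + 1) S' hsorted' hperm']
      rw [pvBsumPartial_succ arr N m, hmin1]
      push_cast
      ring_nf
    · -- no insert: m + 1 = N
      have hmN : m + 1 = N := by omega
      have hmin1 : min (m + 1) (N - 1) = m := by omega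
      rw [if_neg hcase]
      simp only [hgetm1]
      refine ⟨S, ?_, hsorted, by rw [hmin1]; exact hperm⟩
      rw [pvCountS arr N m (m + 1) S hsorted hperm]
      rw [pvBsumPartial_succ arr N m, hmin1]
      push_cast
      ring_nf

lemma pvB_eq (arr : List Int) (n : Int) (h0 : 0 ≤ n) (hlen : n ≤ (arr.length : Int)) :
    Count_alt arr n = ↑(pvBsumPartial arr n.toNat n.toNat) := by
  set N : Nat := n.toNat with hN
  have hn : ((N : Nat) : Int) = n := by omega
  have hNlen : N ≤ arr.length := by omega
  unfold Count_alt
  rw [← hn]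
  rw [pvPref_eq arr N hNlen]
  dsimp only
  rw [pvGetD_neg_one ((List.range (N + 1)).map (pvP arr)) N (by simp) 0]
  rw [PySem.List.getD_map_range (pvP arr) (N + 1) N 0 (by omega)]
  obtain ⟨S, hfold, _, _⟩ := pvBloop arr N N le_rfl
  rw [hfold]

lemma pvNeg_case (arr : List Int) (n : Int) (h : n < 0) :
    Count arr n = 0 ∧ Count_alt arr n = 0 := by
  constructor
  · unfold Count
    rw [PySem.List.pyRange_one_eq_nil (le_of_lt h),
        PySem.List.pyRange_one_eq_nil (by omega)]
    simp
  · unfold Count_alt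
    rw [PySem.List.pyRange_one_eq_nil (le_of_lt h),
        PySem.List.pyRange_one_eq_nil (by omega)]
    simp

lemma pvSwap (N : Nat) (q : Nat → Nat → Bool) :
    ((List.range (N - 1)).map (fun a => ((List.range' (a + 1) (N - a)).countP (q a)))).sum
      = ((List.range' 1 N).map (fun b => ((List.range (min b (N - 1))).countP (fun a => q a b)))).sum := by
  rw [pvSum_map_range]
  rw [List.range'_eq_map_range, List.map_map]
  rw [pvSum_map_range]
  have hL : ∀ a ∈ Finset.range (N - 1),
      ((List.range' (a + 1) (N - a)).countP (q a))
        = ∑ b ∈ Finset.Ico 1 (N + 1), (if b ∈ Finset.Ico (a + 1) (N + 1) then (if q a b then 1 else 0) else 0) := by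
    intro a ha
    have haN : a < N - 1 := Finset.mem_range.mp ha
    rw [Finset.sum_ite_mem, Finset.Ico_inter_Ico]
    rw [show max 1 (a + 1) = a + 1 by omega, show min (N + 1) (N + 1) = N + 1 by omega]
    rw [Finset.sum_Ico_eq_sum_range]
    rw [show N + 1 - (a + 1) = N - a by omega]
    rw [List.range'_eq_map_range, List.countP_map, pvCountP_range_eq]
    refine Finset.sum_congr rfl (fun k _ => ?_)
    simp [Nat.add_comm a 1, Nat.add_assoc]
  rw [Finset.sum_congr rfl hL, Finset.sum_comm, Finset.sum_Ico_eq_sum_range]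
  rw [show N + 1 - 1 = N by omega]
  refine Finset.sum_congr rfl (fun k hk => ?_)
  have hkN : k < N := Finset.mem_range.mp hk
  have hcond : ∀ a ∈ Finset.range (N - 1),
      (if (1 + k) ∈ Finset.Ico (a + 1) (N + 1) then (if q a (1 + k) then 1 else 0) else 0)
        = (if a ∈ Finset.range (1 + k) then (if q a (1 + k) then 1 else 0) else 0) := by
    intro a ha
    have haN : a < N - 1 := Finset.mem_range.mp ha
    refine if_congr ?_ rfl rfl
    rw [Finset.mem_Ico, Finset.mem_range]
    omega
  rw [Finset.sum_congr rfl hcond, Finset.sum_ite_mem, Finset.range_inter_range]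
  rw [min_comm (N - 1) (1 + k)]
  show _ = List.countP (fun a => q a (1 + k)) (List.range (min (1 + k) (N - 1)))
  rw [pvCountP_range_eq]

-- ===== VERDICT (by name: the statement is the Claim_ definition above) =====
theorem Count_spec : Claim_equal_Count := by
  intro arr n _ hpre
  unfold Spec_Count
  rcases lt_or_ge n 0 with hneg | h0
  · rcases pvNeg_case arr n hneg with ⟨h1, h2⟩
    rw [h1, h2]
  · rw [pvA_eq arr n h0 hpre, pvB_eq arr n h0 hpre]
    unfold pvAsum pvBsumPartial
    exact congrArg _ (pvSwap n.toNat (pvQ arr n.toNat))
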